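-- pv_equiv track=rewrite | github.com/YV-Hackathon/api | model/query_model.py | traits_to_trait_ids
-- ===== SOURCE A (Python) =====
-- def traits_to_trait_ids(values: list[str], trait2idx: dict[str, int]) -> list[int]:
--     """Resolve trait selections to trained IDs when the model was trained on value-only tokens.
--
--     - Accepts inputs like "Group::Value" or just "Value".
--     - Always looks up by the Value portion against trait2idx keys.
--     - Performs lenient matching (ignoring commas) when exact value isn't found.
--     """
--     def norm(s: str) -> str:
--         return ' '.join(str(s).replace('–', '-').split()).strip()
--
--     def loose_norm(s: str) -> str:
--         return norm(s).replace(',', '')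
--
--     # Build maps from value-only -> token key present in trait2idx
--     exact_value_to_key: dict[str, str] = {}
--     loose_value_to_keys: dict[str, list[str]] = {}
--
--     for tok in trait2idx.keys():
--         # Extract value portion if keys happen to be in Group::Value form; otherwise use tok as-is
--         value_part = tok.split('::', 1)[-1]
--         v_exact = norm(value_part)
--         v_loose = loose_norm(value_part)
--         exact_value_to_key.setdefault(v_exact, tok)
--         loose_value_to_keys.setdefault(v_loose, []).append(tok)
--
--     resolved_keys: list[str] = []
--     for raw in values:
--         # Always resolve by value (strip any group prefix if provided)
--         value_only = raw.split('::', 1)[-1]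
--         v_exact = norm(value_only)
--         v_loose = loose_norm(value_only)
--
--         key = exact_value_to_key.get(v_exact)
--         if key is None:
--             candidates = loose_value_to_keys.get(v_loose, [])
--             if not candidates:
--                 raise KeyError(f"Unknown trait value: {raw}")
--             # If multiple candidates share the same value across groups, pick the first
--             # (training on value-only implies they are equivalent for embedding lookup)
--             key = candidates[0]
--         resolved_keys.append(key)
--
--     return [trait2idx[k] for k in resolved_keys]
-- ===== SOURCE B (Python) =====
-- def traits_to_trait_ids(values: list[str], trait2idx: dict[str, int]) -> list[int]:
--     """No prebuilt maps: for each value scan the keys once for an exact-norm match,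
--     then (only if that fails) scan again for a loose match."""
--     def norm(s: str) -> str:
--         return ' '.join(str(s).replace('\u2013', '-').split()).strip()
--
--     def loose_norm(s: str) -> str:
--         return norm(s).replace(',', '')
--
--     def value_part(tok: str) -> str:
--         return tok.split('::', 1)[-1]
--
--     keys = list(trait2idx.keys())
--     out: list[int] = []
--     for raw in values:
--         v = value_part(raw)
--         v_exact = norm(v)
--         v_loose = loose_norm(v)
--         key = next((k for k in keys if norm(value_part(k)) == v_exact), None)
--         if key is None:
--             key = next((k for k in keys if loose_norm(value_part(k)) == v_loose), None)
--         if key is None: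
--             raise KeyError(f"Unknown trait value: {raw}")
--         out.append(trait2idx[key])
--     return out
-- ===== Notes on version B (the rewrite author's own statement) =====
-- stated objective: simpler
-- what changed: Drops both prebuilt value->key maps; each value is resolved by a direct first-match scan of the keys (exact norm first, then a loose-norm scan), relying on first-key-in-insertion-order winning in both maps.
import Mathlib
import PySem

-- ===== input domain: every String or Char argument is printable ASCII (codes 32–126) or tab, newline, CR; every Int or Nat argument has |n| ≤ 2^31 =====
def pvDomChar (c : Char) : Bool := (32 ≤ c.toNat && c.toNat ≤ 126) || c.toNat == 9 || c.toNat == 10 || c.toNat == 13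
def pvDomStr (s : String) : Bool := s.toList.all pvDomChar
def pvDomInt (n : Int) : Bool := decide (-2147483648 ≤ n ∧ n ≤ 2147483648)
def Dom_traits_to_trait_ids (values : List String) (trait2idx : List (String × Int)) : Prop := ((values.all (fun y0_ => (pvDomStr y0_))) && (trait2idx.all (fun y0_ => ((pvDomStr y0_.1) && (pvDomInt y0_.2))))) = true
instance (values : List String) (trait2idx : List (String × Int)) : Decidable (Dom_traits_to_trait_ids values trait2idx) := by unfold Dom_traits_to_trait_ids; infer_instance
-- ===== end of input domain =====

-- B drops A's two prebuilt value->key maps and resolves each value by a direct first-match scan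
-- of the keys (exact norm first, then a loose-norm scan); objective: simpler. Return value only.

-- ===== PORT A =====
-- norm(s) = ' '.join(s.replace('–', '-').split()).strip()
def pvNorm (s : String) : String :=
  PySem.Str.strip (PySem.Str.join " " (PySem.Str.split₀ (PySem.Str.replace s "–" "-")))

-- loose_norm(s) = norm(s).replace(',', '')
def pvLoose (s : String) : String := PySem.Str.replace (pvNorm s) "," ""

-- tok.split('::', 1)[-1]
def pvValuePart (s : String) : String :=
  ((PySem.Str.splitMax? s "::" 1).getD [s]).getLastD s

-- A's first loop: for tok in trait2idx.keys(): setdefault / setdefault-append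
def pvBuildMaps (keys : List String) :
    PySem.Dict String String × PySem.Dict String (List String) :=
  keys.foldl
    (fun (p : PySem.Dict String String × PySem.Dict String (List String)) tok =>
      (p.1.setdefault (pvNorm (pvValuePart tok)) tok,
       p.2.modify (pvLoose (pvValuePart tok)) [] (· ++ [tok])))
    (PySem.Dict.empty, PySem.Dict.empty)

-- A's per-value resolution: exact map lookup, else first loose candidate; none = KeyError
def pvResolveA (exact : PySem.Dict String String) (loose : PySem.Dict String (List String))
    (raw : String) : Option String :=
  let v_exact := pvNorm (pvValuePart raw)
  let v_loose := pvLoose (pvValuePart raw)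
  match exact.get? v_exact with
  | some k => some k
  | none => (loose.getD v_loose []).head?

-- A's second loop building resolved_keys (none = the KeyError raise)
def pvResolveAllA (exact : PySem.Dict String String) (loose : PySem.Dict String (List String)) :
    List String → Option (List String)
  | [] => some []
  | raw :: rest =>
    match pvResolveA exact loose raw with
    | none => none
    | some k => (pvResolveAllA exact loose rest).map (k :: ·)

def traits_to_trait_ids (values : List String) (trait2idx : List (String × Int)) : List Int :=
  match pvResolveAllA (pvBuildMaps (PySem.Dict.ofList trait2idx).keys).1
      (pvBuildMaps (PySem.Dict.ofList trait2idx).keys).2 values with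
  | none => []   -- unreachable under Pre_ (Python raises KeyError there)
  | some ks => ks.map (fun k => ((PySem.Dict.ofList trait2idx).get? k).getD 0)

-- ===== PORT B =====
-- B's per-value double scan: first key with equal norm, else first key with equal loose norm
def pvFindKey (keys : List String) (raw : String) : Option String :=
  let v_exact := pvNorm (pvValuePart raw)
  let v_loose := pvLoose (pvValuePart raw)
  match keys.find? (fun k => pvNorm (pvValuePart k) == v_exact) with
  | some k => some k
  | none => keys.find? (fun k => pvLoose (pvValuePart k) == v_loose)

-- B's single output loop (none = the KeyError raise in Source B)
def pvLookupAllB (d : PySem.Dict String Int) (keys : List String) :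
    List String → Option (List Int)
  | [] => some []
  | raw :: rest =>
    match pvFindKey keys raw with
    | none => none
    | some k => (pvLookupAllB d keys rest).map ((d.get? k).getD 0 :: ·)

def traits_to_trait_ids_alt (values : List String) (trait2idx : List (String × Int)) : List Int :=
  match pvLookupAllB (PySem.Dict.ofList trait2idx) (PySem.Dict.ofList trait2idx).keys values with
  | none => []
  | some out => out

-- ===== PRECONDITION & SPEC =====
-- Pre_ excludes exactly the inputs where Python A raises KeyError: some value whose
-- loose-normalized value part matches no key's loose-normalized value part.
def Pre_traits_to_trait_ids (values : List String) (trait2idx : List (String × Int)) : Prop :=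
  ∀ raw ∈ values, ∃ p ∈ trait2idx, pvLoose (pvValuePart p.1) = pvLoose (pvValuePart raw)
instance (values : List String) (trait2idx : List (String × Int)) : Decidable (Pre_traits_to_trait_ids values trait2idx) := by unfold Pre_traits_to_trait_ids; infer_instance

def pvWitness_traits_to_trait_ids : List String × (List (String × Int)) :=
  ([], [("a", 1)])

def Spec_traits_to_trait_ids (values : List String) (trait2idx : List (String × Int)) (out : List Int) : Prop := out = traits_to_trait_ids_alt values trait2idx
instance (values : List String) (trait2idx : List (String × Int)) (out : List Int) : Decidable (Spec_traits_to_trait_ids values trait2idx out) := by unfold Spec_traits_to_trait_ids; infer_instance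

-- ===== CLAIM (what is proved, stated in full; the proofs are below) =====
def Claim_equal_traits_to_trait_ids : Prop := ∀ (values : List String) (trait2idx : List (String × Int)), Dom_traits_to_trait_ids values trait2idx → Pre_traits_to_trait_ids values trait2idx → Spec_traits_to_trait_ids values trait2idx (traits_to_trait_ids values trait2idx)

-- ===== LEMMAS AND PROOFS =====

-- the pair-building loop of A splits into its two independent dictionary folds
theorem pv_buildMaps_aux (keys : List String) (e : PySem.Dict String String)
    (l : PySem.Dict String (List String)) :
    keys.foldl
      (fun (p : PySem.Dict String String × PySem.Dict String (List String)) tok =>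
        (p.1.setdefault (pvNorm (pvValuePart tok)) tok,
         p.2.modify (pvLoose (pvValuePart tok)) [] (· ++ [tok]))) (e, l) =
      (keys.foldl (fun d tok => d.setdefault (pvNorm (pvValuePart tok)) tok) e,
       keys.foldl (fun d tok => d.modify (pvLoose (pvValuePart tok)) [] (· ++ [tok])) l) := by
  induction keys generalizing e l with
  | nil => rfl
  | cons x xs ih => simp only [List.foldl_cons]; exact ih _ _

theorem pv_buildMaps_eq (keys : List String) :
    pvBuildMaps keys =
      (keys.foldl (fun d tok => d.setdefault (pvNorm (pvValuePart tok)) tok) PySem.Dict.empty,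
       keys.foldl (fun d tok => d.modify (pvLoose (pvValuePart tok)) [] (· ++ [tok]))
         PySem.Dict.empty) :=
  pv_buildMaps_aux keys PySem.Dict.empty PySem.Dict.empty

-- the setdefault-fold keeps the FIRST key achieving each normalized value
theorem pv_get?_foldl_setdefault (keyf : String → String) (l : List String)
    (d : PySem.Dict String String) (v : String) :
    (l.foldl (fun d tok => d.setdefault (keyf tok) tok) d).get? v =
      match d.get? v with
      | some k => some k
      | none => l.find? (fun tok => keyf tok == v) := by
  induction l generalizing d with
  | nil => cases h : d.get? v <;> simp [h]
  | cons x xs ih =>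
    simp only [List.foldl_cons]
    rw [ih]
    by_cases hx : keyf x = v
    · subst hx
      rw [PySem.Dict.get?_setdefault_self d (keyf x) x,
        List.find?_cons_of_pos (by simp)]
      cases h : d.get? (keyf x) <;> simp only [Option.getD_some, Option.getD_none]
    · rw [PySem.Dict.get?_setdefault_of_ne d x (Ne.symm hx),
        List.find?_cons_of_neg (by simp [hx])]

-- first match = head of all matches
theorem pv_find?_eq_head?_filter {α : Type} (p : α → Bool) (l : List α) :
    l.find? p = (l.filter p).head? := by
  induction l with
  | nil => rfl
  | cons x xs ih =>
    cases h : p x with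
    | false => rw [List.find?_cons_of_neg (by simp [h]), List.filter_cons_of_neg (by simp [h]), ih]
    | true => rw [List.find?_cons_of_pos h, List.filter_cons_of_pos h]; rfl

-- projecting the grouped pairs back to the tokens
theorem pv_filter_map_snd (keyf : String → String) (v : String) (l : List String) :
    (((l.map (fun tok => (keyf tok, tok))).filter (fun p => p.1 == v)).map (fun x => x.2)) =
      l.filter (fun tok => keyf tok == v) := by
  induction l with
  | nil => rfl
  | cons x xs ih =>
    cases hx : (keyf x == v) <;>
      simp only [List.map_cons, List.filter_cons, hx] <;> simp [ih]

-- the modify-append fold groups, in key order, the tokens by normalized value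
theorem pv_getD_foldl_modify (keyf : String → String) (l : List String)
    (d : PySem.Dict String (List String)) (v : String) :
    (l.foldl (fun d tok => d.modify (keyf tok) [] (· ++ [tok])) d).getD v [] =
      d.getD v [] ++ l.filter (fun tok => keyf tok == v) := by
  have h : l.foldl (fun d tok => d.modify (keyf tok) [] (· ++ [tok])) d
      = (l.map (fun tok => (keyf tok, tok))).foldl
          (fun d p => d.modify p.1 [] (· ++ [p.2])) d := by
    rw [List.foldl_map]
  rw [h, PySem.Dict.getD_foldl_modify_append, pv_filter_map_snd]

-- per-value agreement: A's map-based resolution = B's double scan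
theorem pv_resolve_eq (keys : List String) (raw : String) :
    pvResolveA (pvBuildMaps keys).1 (pvBuildMaps keys).2 raw = pvFindKey keys raw := by
  rw [pv_buildMaps_eq]
  unfold pvResolveA pvFindKey
  dsimp only
  rw [pv_get?_foldl_setdefault (fun tok => pvNorm (pvValuePart tok)) keys PySem.Dict.empty,
    pv_getD_foldl_modify (fun tok => pvLoose (pvValuePart tok)) keys PySem.Dict.empty]
  simp only [PySem.Dict.get?_empty, PySem.Dict.getD_empty, List.nil_append]
  rw [← pv_find?_eq_head?_filter]

-- whole-list agreement, including agreement of the failure case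
theorem pv_resolveAll_eq (d : PySem.Dict String Int) (keys : List String)
    (values : List String) :
    (pvResolveAllA (pvBuildMaps keys).1 (pvBuildMaps keys).2 values).map
        (List.map (fun k => (d.get? k).getD 0)) =
      pvLookupAllB d keys values := by
  induction values with
  | nil => rfl
  | cons raw rest ih =>
    simp only [pvResolveAllA, pvLookupAllB]
    rw [pv_resolve_eq]
    cases pvFindKey keys raw with
    | none => rfl
    | some k =>
      simp only [← ih]
      cases pvResolveAllA (pvBuildMaps keys).1 (pvBuildMaps keys).2 rest <;> simp

-- ===== VERDICT (by name: the statement is the Claim_ definition above) =====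
theorem traits_to_trait_ids_spec : Claim_equal_traits_to_trait_ids := by
  intro values trait2idx _ _
  unfold Spec_traits_to_trait_ids traits_to_trait_ids traits_to_trait_ids_alt
  rw [← pv_resolveAll_eq (PySem.Dict.ofList trait2idx) (PySem.Dict.ofList trait2idx).keys values]
  cases pvResolveAllA (pvBuildMaps (PySem.Dict.ofList trait2idx).keys).1
      (pvBuildMaps (PySem.Dict.ofList trait2idx).keys).2 values <;> rfl
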